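-- pv_equiv track=rewrite | github.com/downingtim/GTPV-SPPV-PVG | scripts/05_genome_analysis.GTPV.py | extract_region_from_alignment
-- ===== SOURCE A (Python) =====
-- def extract_region_from_alignment(aligned_seq, reference_seq, start, end):
--     """
--     Extract region from aligned sequence based on reference coordinates.
--     Find alignment columns corresponding to reference coordinates, then extract same columns from all sequences.
--     """
--     # Find the alignment columns that correspond to the reference coordinates
--     ref_pos = 0  # Position in unaligned reference sequence (1-based)
--     align_start = None
--     align_end = None
--
--     for i, char in enumerate(reference_seq):
--         if char != '-':  # Only count non-gap characters
--             ref_pos += 1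
--             if ref_pos == start and align_start is None:
--                 align_start = i
--             if ref_pos == end:
--                 align_end = i + 1
--                 break
--
--     if align_start is None or align_end is None:
--         return ""
--
--     # Extract the same alignment columns from the target sequence
--     if align_end > len(aligned_seq):
--         align_end = len(aligned_seq)
--
--     return aligned_seq[align_start:align_end]
-- ===== SOURCE B (Python) =====
-- def extract_region_from_alignment(aligned_seq, reference_seq, start, end):
--     # Index the alignment columns of non-gap reference characters once,
--     # then map the 1-based coordinates to columns by direct indexing.
--     cols = [i for i, c in enumerate(reference_seq) if c != '-']
--     if not (1 <= start <= end <= len(cols)):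
--         return ""
--     a = cols[start - 1]
--     b = min(cols[end - 1] + 1, len(aligned_seq))
--     return aligned_seq[a:b]
-- ===== Notes on version B (the rewrite author's own statement) =====
-- stated objective: simpler
-- what changed: A's single stateful search loop (position counter, two None sentinels, early break) is replaced by building the list of non-gap alignment columns once and mapping the 1-based coordinates to columns by direct indexing behind one range guard.
import Mathlib
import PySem

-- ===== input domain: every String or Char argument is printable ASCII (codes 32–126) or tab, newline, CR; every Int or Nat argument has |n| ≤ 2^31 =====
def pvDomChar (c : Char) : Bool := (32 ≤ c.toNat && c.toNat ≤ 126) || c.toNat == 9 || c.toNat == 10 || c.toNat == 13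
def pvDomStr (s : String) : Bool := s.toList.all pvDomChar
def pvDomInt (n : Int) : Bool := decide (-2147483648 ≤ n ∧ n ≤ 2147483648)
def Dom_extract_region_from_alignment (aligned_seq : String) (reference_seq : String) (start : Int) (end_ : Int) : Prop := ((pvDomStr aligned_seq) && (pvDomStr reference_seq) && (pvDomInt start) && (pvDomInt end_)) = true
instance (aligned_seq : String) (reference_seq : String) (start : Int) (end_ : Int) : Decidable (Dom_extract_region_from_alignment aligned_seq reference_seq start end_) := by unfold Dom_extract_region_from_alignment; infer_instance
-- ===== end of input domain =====

-- B replaces A's stateful searching loop (counter + two sentinels + early break) by one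
-- column-index list built up front and direct indexing into it; objective: simpler, same cost.

-- ===== PORT A =====
-- the for-loop over enumerate(reference_seq) with ref_pos / align_start / align_end and the break
def pvALoop (cs : List (Int × Char)) (refPos : Int) (start end_ : Int)
    (alignStart : Option Int) : Option Int × Option Int :=
  match cs with
  | [] => (alignStart, none)
  | (i, c) :: rest =>
    if c ≠ '-' then
      let refPos' := refPos + 1
      let alignStart' := if refPos' = start ∧ alignStart = none then some i else alignStart
      if refPos' = end_ then (alignStart', some (i + 1))
      else pvALoop rest refPos' start end_ alignStart'
    else pvALoop rest refPos start end_ alignStart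

def extract_region_from_alignment (aligned_seq : String) (reference_seq : String) (start : Int) (end_ : Int) : String :=
  match pvALoop (PySem.List.enumerate reference_seq.toList 0) 0 start end_ none with
  | (some alignStart, some alignEnd) =>
      let alignEnd' := if alignEnd > PySem.Str.len aligned_seq then PySem.Str.len aligned_seq else alignEnd
      PySem.Str.slice aligned_seq (some alignStart) (some alignEnd')
  | _ => ""

-- ===== PORT B =====
-- cols = [i for i, c in enumerate(reference_seq) if c != '-']
def pvCols (cs : List (Int × Char)) : List Int :=
  match cs with
  | [] => []
  | (i, c) :: rest => if c ≠ '-' then i :: pvCols rest else pvCols rest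

def extract_region_from_alignment_alt (aligned_seq : String) (reference_seq : String) (start : Int) (end_ : Int) : String :=
  let cols := pvCols (PySem.List.enumerate reference_seq.toList 0)
  if 1 ≤ start ∧ start ≤ end_ ∧ end_ ≤ (cols.length : Int) then
    let a := PySem.List.pyGetD cols (start - 1) 0
    let b := min (PySem.List.pyGetD cols (end_ - 1) 0 + 1) (PySem.Str.len aligned_seq)
    PySem.Str.slice aligned_seq (some a) (some b)
  else ""

-- ===== PRECONDITION & SPEC =====
def Spec_extract_region_from_alignment (aligned_seq : String) (reference_seq : String) (start : Int) (end_ : Int) (out : String) : Prop := out = extract_region_from_alignment_alt aligned_seq reference_seq start end_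
instance (aligned_seq : String) (reference_seq : String) (start : Int) (end_ : Int) (out : String) : Decidable (Spec_extract_region_from_alignment aligned_seq reference_seq start end_ out) := by unfold Spec_extract_region_from_alignment; infer_instance

-- ===== CLAIM (what is proved, stated in full; the proofs are below) =====
def Claim_equal_extract_region_from_alignment : Prop := ∀ (aligned_seq : String) (reference_seq : String) (start : Int) (end_ : Int), Dom_extract_region_from_alignment aligned_seq reference_seq start end_ → Spec_extract_region_from_alignment aligned_seq reference_seq start end_ (extract_region_from_alignment aligned_seq reference_seq start end_)

-- ===== LEMMAS AND PROOFS =====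

-- characterisation of A's loop results via the column list
def pvOptEnd (cols : List Int) (e : Int) : Option Int :=
  if 1 ≤ e ∧ e ≤ (cols.length : Int) then some (cols.getD (e - 1).toNat 0 + 1) else none

def pvOptStart (cols : List Int) (st e : Int) : Option Int :=
  if 1 ≤ st ∧ st ≤ (cols.length : Int) ∧ (e < 1 ∨ st ≤ e) then some (cols.getD (st - 1).toNat 0) else none

theorem pvOptEnd_cons_one (x : Int) (cols : List Int) :
    pvOptEnd (x :: cols) 1 = some (x + 1) := by
  unfold pvOptEnd
  rw [if_pos ⟨le_refl 1, by simp only [List.length_cons]; push_cast; omega⟩]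
  simp

theorem pvOptEnd_cons (x : Int) (cols : List Int) (e : Int) (he : e ≠ 1) :
    pvOptEnd (x :: cols) e = pvOptEnd cols (e - 1) := by
  unfold pvOptEnd
  simp only [List.length_cons]
  split_ifs with h1 h2 h2
  · have hn : (e - 1).toNat = (e - 1 - 1).toNat + 1 := by push_cast at h1; omega
    rw [hn, List.getD_cons_succ]
  · exfalso; push_cast at h1 h2; omega
  · exfalso; push_cast at h1 h2; omega
  · rfl

theorem pvOptStart_cons_one (x : Int) (cols : List Int) (e : Int) :
    pvOptStart (x :: cols) 1 e = some x := by
  unfold pvOptStart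
  rw [if_pos ⟨le_refl 1, by simp only [List.length_cons]; push_cast; omega, by omega⟩]
  simp

theorem pvOptStart_cons (x : Int) (cols : List Int) (st e : Int) (hst : st ≠ 1) (he : e ≠ 1) :
    pvOptStart (x :: cols) st e = pvOptStart cols (st - 1) (e - 1) := by
  unfold pvOptStart
  simp only [List.length_cons]
  split_ifs with h1 h2 h2
  · have hn : (st - 1).toNat = (st - 1 - 1).toNat + 1 := by push_cast at h1; omega
    rw [hn, List.getD_cons_succ]
  · exfalso; push_cast at h1 h2; omega
  · exfalso; push_cast at h1 h2; omega
  · rfl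

theorem pvALoop_cons_gap (i : Int) (rest : List (Int × Char)) (r start end_ : Int)
    (as : Option Int) : pvALoop ((i, '-') :: rest) r start end_ as
      = pvALoop rest r start end_ as := by
  simp [pvALoop]

theorem pvALoop_cons_nongap (i : Int) (c : Char) (rest : List (Int × Char))
    (r start end_ : Int) (as : Option Int) (hc : c ≠ '-') :
    pvALoop ((i, c) :: rest) r start end_ as
      = (if r + 1 = end_ then ((if r + 1 = start ∧ as = none then some i else as), some (i + 1))
         else pvALoop rest (r + 1) start end_
              (if r + 1 = start ∧ as = none then some i else as)) := by
  simp [pvALoop, hc]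

theorem pvALoop_some (cs : List Char) (start end_ : Int) : ∀ (s r a : Int),
    pvALoop (PySem.List.enumerate cs s) r start end_ (some a)
      = (some a, pvOptEnd (pvCols (PySem.List.enumerate cs s)) (end_ - r)) := by
  induction cs with
  | nil => intro s r a; simp [PySem.List.enumerate, pvALoop, pvCols, pvOptEnd]; omega
  | cons c rest ih =>
    intro s r a
    rw [PySem.List.enumerate_cons]
    by_cases hc : c = '-'
    · subst hc
      rw [pvALoop_cons_gap, ih, pvCols]
      simp
    · rw [pvALoop_cons_nongap _ _ _ _ _ _ _ hc]
      have hcols : pvCols ((s, c) :: PySem.List.enumerate rest (s + 1))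
          = s :: pvCols (PySem.List.enumerate rest (s + 1)) := by simp [pvCols, hc]
      rw [hcols]
      simp only [Option.some_ne_none, and_false, if_false]
      by_cases he : r + 1 = end_
      · rw [if_pos he]
        rw [show end_ - r = 1 by omega, pvOptEnd_cons_one]
      · rw [if_neg he, ih]
        rw [pvOptEnd_cons _ _ _ (by omega)]
        congr 1
        · congr 1
          omega

theorem pvALoop_none (cs : List Char) (start end_ : Int) : ∀ (s r : Int),
    pvALoop (PySem.List.enumerate cs s) r start end_ none
      = (pvOptStart (pvCols (PySem.List.enumerate cs s)) (start - r) (end_ - r),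
         pvOptEnd (pvCols (PySem.List.enumerate cs s)) (end_ - r)) := by
  induction cs with
  | nil =>
    intro s r
    simp [PySem.List.enumerate, pvALoop, pvCols, pvOptEnd, pvOptStart]
    omega
  | cons c rest ih =>
    intro s r
    rw [PySem.List.enumerate_cons]
    by_cases hc : c = '-'
    · subst hc
      rw [pvALoop_cons_gap, ih, pvCols]
      simp
    · rw [pvALoop_cons_nongap _ _ _ _ _ _ _ hc]
      have hcols : pvCols ((s, c) :: PySem.List.enumerate rest (s + 1))
          = s :: pvCols (PySem.List.enumerate rest (s + 1)) := by simp [pvCols, hc]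
      rw [hcols]
      by_cases he : r + 1 = end_
      · rw [if_pos he]
        by_cases hs : r + 1 = start
        · rw [if_pos ⟨hs, rfl⟩]
          rw [show end_ - r = 1 by omega, show start - r = 1 by omega,
              pvOptEnd_cons_one, pvOptStart_cons_one]
        · rw [if_neg (fun h => hs h.1)]
          rw [show end_ - r = 1 by omega, pvOptEnd_cons_one]
          unfold pvOptStart
          rw [if_neg (by rintro ⟨a1, a2, a3 | a3⟩ <;> omega)]
      · rw [if_neg he]
        by_cases hs : r + 1 = start
        · rw [if_pos ⟨hs, rfl⟩, pvALoop_some]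
          rw [pvOptEnd_cons _ _ _ (by omega),
              show start - r = 1 by omega, pvOptStart_cons_one]
          rw [show end_ - r - 1 = end_ - (r + 1) by omega]
        · rw [if_neg (fun h => hs h.1), ih]
          rw [pvOptEnd_cons _ _ _ (by omega),
              pvOptStart_cons _ _ _ _ (by omega) (by omega)]
          rw [show end_ - r - 1 = end_ - (r + 1) by omega,
              show start - r - 1 = start - (r + 1) by omega]

-- ===== VERDICT (by name: the statement is the Claim_ definition above) =====
theorem extract_region_from_alignment_spec : Claim_equal_extract_region_from_alignment := by
  intro al ref start end_ _
  unfold Spec_extract_region_from_alignment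
  unfold extract_region_from_alignment extract_region_from_alignment_alt
  rw [pvALoop_none]
  simp only [sub_zero]
  set cols := pvCols (PySem.List.enumerate ref.toList 0) with hcols
  by_cases hOK : 1 ≤ start ∧ start ≤ end_ ∧ end_ ≤ (cols.length : Int)
  · obtain ⟨h1, h2, h3⟩ := hOK
    have hS : pvOptStart cols start end_ = some (cols.getD (start - 1).toNat 0) := by
      unfold pvOptStart; rw [if_pos ⟨h1, by omega, Or.inr h2⟩]
    have hE : pvOptEnd cols end_ = some (cols.getD (end_ - 1).toNat 0 + 1) := by
      unfold pvOptEnd; rw [if_pos ⟨by omega, h3⟩]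
    rw [hS, hE, if_pos ⟨h1, h2, h3⟩]
    show PySem.Str.slice al (some (cols.getD (start - 1).toNat 0))
        (some (if cols.getD (end_ - 1).toNat 0 + 1 > PySem.Str.len al then PySem.Str.len al
               else cols.getD (end_ - 1).toNat 0 + 1)) = _
    have hga : PySem.List.pyGetD cols (start - 1) 0 = cols.getD (start - 1).toNat 0 := by
      rw [PySem.List.pyGetD_eq_getElem cols 0 (by omega) (by omega)]
      rw [List.getD_eq_getElem cols 0 (by omega)]
    have hgb : PySem.List.pyGetD cols (end_ - 1) 0 = cols.getD (end_ - 1).toNat 0 := by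
      rw [PySem.List.pyGetD_eq_getElem cols 0 (by omega) (by omega)]
      rw [List.getD_eq_getElem cols 0 (by omega)]
    rw [hga, hgb]
    have hmin : (if cols.getD (end_ - 1).toNat 0 + 1 > PySem.Str.len al then PySem.Str.len al
          else cols.getD (end_ - 1).toNat 0 + 1)
        = min (cols.getD (end_ - 1).toNat 0 + 1) (PySem.Str.len al) := by
      rw [Int.min_def]
      by_cases hp : cols.getD (end_ - 1).toNat 0 + 1 ≤ PySem.Str.len al
      · rw [if_neg (by omega), if_pos hp]
      · rw [if_pos (by omega), if_neg hp]
    rw [hmin]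
  · rw [if_neg hOK]
    cases hS : pvOptStart cols start end_ with
    | none => cases hE : pvOptEnd cols end_ <;> rfl
    | some v =>
      cases hE : pvOptEnd cols end_ with
      | none => rfl
      | some w =>
        exfalso
        unfold pvOptStart at hS
        unfold pvOptEnd at hE
        by_cases hb : 1 ≤ end_ ∧ end_ ≤ (cols.length : Int)
        · rw [if_pos hb] at hE
          by_cases ha : 1 ≤ start ∧ start ≤ (cols.length : Int) ∧ (end_ < 1 ∨ start ≤ end_)
          · exact hOK ⟨ha.1, by rcases ha.2.2 with h | h; omega; exact h, hb.2⟩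
          · rw [if_neg ha] at hS; simp at hS
        · rw [if_neg hb] at hE; simp at hE
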